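-- pv_equiv track=rewrite | github.com/CampbellTrevor/Amorsize | examples/function_profiling_demo.py | nested_helper_functions
-- ===== SOURCE A (Python) =====
-- def nested_helper_functions(x):
--     """
--     Function with nested helper calls to show call tree in profiler.
--     """
--     def level1_helper(val):
--         """First level helper."""
--         result = 0
--         for i in range(50):
--             result += val + i
--         return result
--
--     def level2_helper(val):
--         """Second level helper that calls level1."""
--         intermediate = level1_helper(val)
--         return intermediate * 2
--
--     def level3_helper(val):
--         """Third level helper that calls level2."""
--         intermediate = level2_helper(val)
--         for i in range(10):
--             intermediate += level1_helper(val + i)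
--         return intermediate
--
--     return level3_helper(x)
-- ===== SOURCE B (Python) =====
-- def nested_helper_functions(x):
--     """Closed form of the nested helper cascade: 600*x + 16950."""
--     return 600 * x + 16950
-- ===== Notes on version B (the rewrite author's own statement) =====
-- stated objective: simpler
-- what changed: Replaced the nested helpers and their fixed-count loops (level1 = 50*v+1225, level2 doubles it, level3 adds ten more level1 calls) with the single closed-form expression 600*x + 16950.
import Mathlib
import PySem

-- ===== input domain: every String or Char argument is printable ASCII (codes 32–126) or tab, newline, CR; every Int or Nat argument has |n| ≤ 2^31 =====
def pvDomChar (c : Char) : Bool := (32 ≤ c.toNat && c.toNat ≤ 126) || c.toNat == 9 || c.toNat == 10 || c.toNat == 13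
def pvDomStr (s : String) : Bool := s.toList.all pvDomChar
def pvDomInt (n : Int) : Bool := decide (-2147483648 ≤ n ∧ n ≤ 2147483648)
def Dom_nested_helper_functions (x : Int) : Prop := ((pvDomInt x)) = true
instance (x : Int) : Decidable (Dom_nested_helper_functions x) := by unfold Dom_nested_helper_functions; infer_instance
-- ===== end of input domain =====

-- B replaces A's nested helpers and fixed loops with the closed form 600*x + 16950 (objective: simpler).

-- ===== PORT A =====
def pvLevel1Helper (val : Int) : Int :=
  (PySem.List.pyRange 0 50 1).foldl (fun result i => result + (val + i)) 0

def pvLevel2Helper (val : Int) : Int :=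
  pvLevel1Helper val * 2

def pvLevel3Helper (val : Int) : Int :=
  (PySem.List.pyRange 0 10 1).foldl
    (fun intermediate i => intermediate + pvLevel1Helper (val + i))
    (pvLevel2Helper val)

def nested_helper_functions (x : Int) : Int := pvLevel3Helper x

-- ===== PORT B =====
def nested_helper_functions_alt (x : Int) : Int := 600 * x + 16950

-- ===== PRECONDITION & SPEC =====
def Spec_nested_helper_functions (x : Int) (out : Int) : Prop := out = nested_helper_functions_alt x
instance (x : Int) (out : Int) : Decidable (Spec_nested_helper_functions x out) := by unfold Spec_nested_helper_functions; infer_instance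

-- ===== CLAIM (what is proved, stated in full; the proofs are below) =====
def Claim_equal_nested_helper_functions : Prop := ∀ (x : Int), Dom_nested_helper_functions x → Spec_nested_helper_functions x (nested_helper_functions x)

-- ===== LEMMAS AND PROOFS =====
theorem pvLevel1_closed (val : Int) : pvLevel1Helper val = 50 * val + 1225 := by
  simp [pvLevel1Helper, PySem.List.pyRange, List.range_succ]
  ring

theorem pvLevel3_closed (x : Int) : pvLevel3Helper x = 600 * x + 16950 := by
  simp [pvLevel3Helper, pvLevel2Helper, PySem.List.pyRange, pvLevel1_closed, List.range_succ]
  ring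

-- ===== VERDICT (by name: the statement is the Claim_ definition above) =====
theorem nested_helper_functions_spec : Claim_equal_nested_helper_functions := by
  intro x _
  unfold Spec_nested_helper_functions nested_helper_functions nested_helper_functions_alt
  rw [pvLevel3_closed]
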